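-- pv_equiv track=rewrite | github.com/wo-aiml-user/wo-voice-bot | data_scraping_pipeline/scraping/cleaner.py | clean_blog_content
-- ===== SOURCE A (Python) =====
-- def clean_blog_content(content: str) -> str:
--     """
--     Clean blog content by removing unnecessary navigation and social sharing links.
--
--     This ensures that only the main informative content remains.
--
--     Args:
--         content: The raw blog content string
--
--     Returns:
--         Cleaned blog content with navigation and social sharing removed
--     """
--     lines = content.split('\n')
--     title_line_index = -1
--
--     # Find the line with the blog title, identified by a markdown bullet that isn't a link
--     for i, line in enumerate(lines):
--         if line.strip().startswith('* ') and not line.strip().startswith('* ['):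
--             title_line_index = i
--             break
--
--     # Locate the index of "Table of Contents" to identify start of actual blog content
--     table_of_contents_index = next((i for i, line in enumerate(lines) if 'Table of Contents' in line), -1)
--
--     if title_line_index >= 0 and table_of_contents_index > title_line_index:
--         # Identify the first meaningful line after "Table of Contents"
--         start_content_index = next((i for i in range(table_of_contents_index + 1, len(lines)) if lines[i].strip()), -1)
--
--         if start_content_index > 0:
--             # Construct cleaned content combining the blog title, table of contents, and main body
--             new_content = '\n'.join(lines[title_line_index:table_of_contents_index + 1]) + '\n' + '\n'.join(lines[start_content_index:])
--             return new_content
--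
--     # Return original content if no specific pattern found
--     return content
-- ===== SOURCE B (Python) =====
-- def clean_blog_content(content: str) -> str:
--     lines = content.split('\n')
--     title = toc = start = -1
--     for i, line in enumerate(lines):
--         s = line.strip()
--         if title < 0 and s.startswith('* ') and not s.startswith('* ['):
--             title = i
--         if toc < 0 and 'Table of Contents' in line:
--             toc = i
--         elif toc >= 0 and start < 0 and s:
--             start = i
--     if title >= 0 and toc > title and start > 0:
--         return '\n'.join(lines[title:toc + 1]) + '\n' + '\n'.join(lines[start:])
--     return content
-- ===== Notes on version B (the rewrite author's own statement) =====
-- stated objective: alternative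
-- what changed: A's three separate short-circuiting scans over the lines (title bullet, 'Table of Contents', and the range-indexed scan for the first nonempty line after it) are fused into one loop over enumerate(lines) that maintains all three indices at once, with the same guards and reconstruction afterwards.
import Mathlib
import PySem

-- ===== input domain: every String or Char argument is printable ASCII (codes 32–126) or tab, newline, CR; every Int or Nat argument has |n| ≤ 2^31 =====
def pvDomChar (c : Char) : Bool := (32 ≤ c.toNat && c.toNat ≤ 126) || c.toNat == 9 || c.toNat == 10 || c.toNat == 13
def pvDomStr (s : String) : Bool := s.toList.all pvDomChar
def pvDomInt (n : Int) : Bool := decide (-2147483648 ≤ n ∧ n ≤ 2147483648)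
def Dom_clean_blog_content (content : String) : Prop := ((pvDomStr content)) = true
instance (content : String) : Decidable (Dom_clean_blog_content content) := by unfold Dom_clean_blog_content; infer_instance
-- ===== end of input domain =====

-- B replaces A's three separate short-circuiting scans over the lines by a single pass that
-- maintains the three indices at once (objective: alternative decomposition, same cost).

-- ===== PORT A =====
-- first i with lines[i].strip().startswith('* ') and not …('* ['), else -1 (the for/break loop)
def aTitleScan : Nat → List String → Int
  | _, [] => -1
  | i, line :: rest =>
    if PySem.Str.startswith (PySem.Str.strip line) "* " = true ∧
       ¬ (PySem.Str.startswith (PySem.Str.strip line) "* [" = true)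
    then (i : Int) else aTitleScan (i + 1) rest

-- next((i for i, line in enumerate(lines) if 'Table of Contents' in line), -1)
def aTocScan : Nat → List String → Int
  | _, [] => -1
  | i, line :: rest =>
    if PySem.Str.isIn "Table of Contents" line = true then (i : Int) else aTocScan (i + 1) rest

-- next((i for i in range(toc+1, len(lines)) if lines[i].strip()), -1); the indices come from
-- pyRange so lines[i] is always in range, read with pyGet?/getD ""
def aStartScan (lines : List String) : List Int → Int
  | [] => -1
  | i :: rest =>
    if PySem.Str.strip ((PySem.List.pyGet? lines i).getD "") ≠ "" then i
    else aStartScan lines rest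

def clean_blog_content (content : String) : String :=
  let lines := (PySem.Str.split? content "\n").getD []   -- sep is the nonempty literal '\n', so split? is some
  let title := aTitleScan 0 lines
  let toc := aTocScan 0 lines
  if 0 ≤ title ∧ title < toc then
    let start := aStartScan lines (PySem.List.pyRange (toc + 1) (lines.length : Int) 1)
    if 0 < start then
      PySem.Str.join "\n" (PySem.List.slice lines (some title) (some (toc + 1))) ++ "\n" ++
        PySem.Str.join "\n" (PySem.List.slice lines (some start) none)
    else content
  else content

-- ===== PORT B =====
-- the 'if title < 0 and s.startswith(…)…: title = i' update of Source B's loop body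
def updTitle (title : Int) (i : Nat) (line : String) : Int :=
  if title < 0 ∧ PySem.Str.startswith (PySem.Str.strip line) "* " = true ∧
     ¬ (PySem.Str.startswith (PySem.Str.strip line) "* [" = true)
  then (i : Int) else title

-- one loop over enumerate(lines) carrying (title, toc, start)
def bLoop : Nat → Int × Int × Int → List String → Int × Int × Int
  | _, st, [] => st
  | i, (title, toc, start), line :: rest =>
    if toc < 0 ∧ PySem.Str.isIn "Table of Contents" line = true then
      bLoop (i + 1) (updTitle title i line, (i : Int), start) rest
    else if 0 ≤ toc ∧ start < 0 ∧ PySem.Str.strip line ≠ "" then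
      bLoop (i + 1) (updTitle title i line, toc, (i : Int)) rest
    else
      bLoop (i + 1) (updTitle title i line, toc, start) rest

def clean_blog_content_alt (content : String) : String :=
  let lines := (PySem.Str.split? content "\n").getD []   -- sep is the nonempty literal '\n', so split? is some
  let st := bLoop 0 (-1, -1, -1) lines
  if 0 ≤ st.1 ∧ st.1 < st.2.1 ∧ 0 < st.2.2 then
    PySem.Str.join "\n" (PySem.List.slice lines (some st.1) (some (st.2.1 + 1))) ++ "\n" ++
      PySem.Str.join "\n" (PySem.List.slice lines (some st.2.2) none)
  else content

-- ===== PRECONDITION & SPEC =====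
def Spec_clean_blog_content (content : String) (out : String) : Prop := out = clean_blog_content_alt content
instance (content : String) (out : String) : Decidable (Spec_clean_blog_content content out) := by unfold Spec_clean_blog_content; infer_instance

-- ===== CLAIM (what is proved, stated in full; the proofs are below) =====
def Claim_equal_clean_blog_content : Prop := ∀ (content : String), Dom_clean_blog_content content → Spec_clean_blog_content content (clean_blog_content content)

-- ===== LEMMAS AND PROOFS =====

-- first index ≥ i whose line strips nonempty, scanning a suffix of lines
def cStart : Nat → List String → Int
  | _, [] => -1
  | i, line :: rest => if PySem.Str.strip line ≠ "" then (i : Int) else cStart (i + 1) rest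

-- what B's third component computes before any toc line has been seen
def sSpec : Nat → List String → Int
  | _, [] => -1
  | i, line :: rest =>
    if PySem.Str.isIn "Table of Contents" line = true then cStart (i + 1) rest
    else sSpec (i + 1) rest

theorem updTitle_of_nonneg (t : Int) (i : Nat) (line : String) (ht : 0 ≤ t) :
    updTitle t i line = t := by
  unfold updTitle
  exact if_neg (by rintro ⟨h, -⟩; omega)

theorem bLoop_title_frozen (r : List String) : ∀ (i : Nat) (t c s : Int), 0 ≤ t →
    (bLoop i (t, c, s) r).1 = t := by
  induction r with
  | nil => intro i t c s ht; simp [bLoop]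
  | cons l r ih =>
    intro i t c s ht
    simp only [bLoop, updTitle_of_nonneg _ _ _ ht]
    split_ifs <;> exact ih _ _ _ _ ht

theorem bLoop_toc_frozen (r : List String) : ∀ (i : Nat) (t c s : Int), 0 ≤ c →
    (bLoop i (t, c, s) r).2.1 = c := by
  induction r with
  | nil => intro i t c s hc; simp [bLoop]
  | cons l r ih =>
    intro i t c s hc
    simp only [bLoop]
    rw [if_neg (by rintro ⟨h, -⟩; omega)]
    split_ifs <;> exact ih _ _ _ _ hc

theorem bLoop_start_frozen (r : List String) : ∀ (i : Nat) (t c s : Int), 0 ≤ s →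
    (bLoop i (t, c, s) r).2.2 = s := by
  induction r with
  | nil => intro i t c s hs; simp [bLoop]
  | cons l r ih =>
    intro i t c s hs
    simp only [bLoop]
    split_ifs with h1 h2
    · exact ih _ _ _ _ hs
    · exact absurd h2.2.1 (by omega)
    · exact ih _ _ _ _ hs

theorem bLoop_title (r : List String) : ∀ (i : Nat) (c s : Int),
    (bLoop i (-1, c, s) r).1 = aTitleScan i r := by
  induction r with
  | nil => intro i c s; simp [bLoop, aTitleScan]
  | cons l r ih =>
    intro i c s
    by_cases hp : PySem.Str.startswith (PySem.Str.strip l) "* " = true ∧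
        ¬ (PySem.Str.startswith (PySem.Str.strip l) "* [" = true)
    · have hu : updTitle (-1) i l = (i : Int) := by
        unfold updTitle; exact if_pos ⟨by omega, hp.1, hp.2⟩
      simp only [bLoop, aTitleScan, hu, if_pos hp]
      split_ifs <;> exact bLoop_title_frozen _ _ _ _ _ (Int.natCast_nonneg i)
    · have hu : updTitle (-1) i l = -1 := by
        unfold updTitle; exact if_neg (by rintro ⟨-, h1, h2⟩; exact hp ⟨h1, h2⟩)
      simp only [bLoop, aTitleScan, hu, if_neg hp]
      split_ifs <;> exact ih _ _ _

theorem bLoop_toc (r : List String) : ∀ (i : Nat) (t s : Int),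
    (bLoop i (t, -1, s) r).2.1 = aTocScan i r := by
  induction r with
  | nil => intro i t s; simp [bLoop, aTocScan]
  | cons l r ih =>
    intro i t s
    simp only [bLoop, aTocScan]
    by_cases hc : PySem.Str.isIn "Table of Contents" l = true
    · rw [if_pos ⟨by omega, hc⟩, if_pos hc]
      exact bLoop_toc_frozen _ _ _ _ _ (Int.natCast_nonneg i)
    · rw [if_neg (by rintro ⟨-, h⟩; exact hc h), if_neg hc,
        if_neg (by rintro ⟨h, -⟩; omega)]
      exact ih _ _ _

theorem bLoop_start_after (r : List String) : ∀ (i : Nat) (t c : Int), 0 ≤ c →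
    (bLoop i (t, c, -1) r).2.2 = cStart i r := by
  induction r with
  | nil => intro i t c hc; simp [bLoop, cStart]
  | cons l r ih =>
    intro i t c hc
    simp only [bLoop, cStart]
    rw [if_neg (by rintro ⟨h, -⟩; omega)]
    by_cases hs : PySem.Str.strip l ≠ ""
    · rw [if_pos ⟨hc, by omega, hs⟩, if_pos hs]
      exact bLoop_start_frozen _ _ _ _ _ (Int.natCast_nonneg i)
    · rw [if_neg (by rintro ⟨-, -, h⟩; exact hs h), if_neg hs]
      exact ih _ _ _ hc

theorem bLoop_start (r : List String) : ∀ (i : Nat) (t : Int),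
    (bLoop i (t, -1, -1) r).2.2 = sSpec i r := by
  induction r with
  | nil => intro i t; simp [bLoop, sSpec]
  | cons l r ih =>
    intro i t
    simp only [bLoop, sSpec]
    by_cases hc : PySem.Str.isIn "Table of Contents" l = true
    · rw [if_pos ⟨by omega, hc⟩, if_pos hc]
      exact bLoop_start_after _ _ _ _ (Int.natCast_nonneg i)
    · rw [if_neg (by rintro ⟨-, h⟩; exact hc h), if_neg hc,
        if_neg (by rintro ⟨h, -⟩; omega)]
      exact ih _ _

-- A's range-driven scan over indices k, …, len-1 is cStart on the dropped suffix
theorem aStartScan_range (lines : List String) : ∀ (n k : Nat), k + n = lines.length →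
    aStartScan lines (PySem.List.pyRange (k : Int) (lines.length : Int) 1) =
      cStart k (lines.drop k) := by
  intro n
  induction n with
  | zero =>
    intro k hk
    rw [PySem.List.pyRange_one_eq_nil (by omega)]
    rw [List.drop_of_length_le (by omega)]
    rfl
  | succ m ih =>
    intro k hk
    have hklt : k < lines.length := by omega
    rw [PySem.List.pyRange_one_cons (by exact_mod_cast hklt)]
    have hdrop : lines.drop k = lines[k] :: lines.drop (k + 1) :=
      (List.getElem_cons_drop hklt).symm
    rw [hdrop]
    simp only [aStartScan, cStart]
    have hget : (PySem.List.pyGet? lines ((k : Nat) : Int)).getD "" = lines[k] := by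
      rw [PySem.List.pyGet?_natCast, List.getElem?_eq_getElem hklt]
      rfl
    rw [hget]
    split_ifs with h
    · rfl
    · have hc : ((k : Int) + 1) = ((k + 1 : Nat) : Int) := by push_cast; ring
      rw [hc, ih (k + 1) (by omega)]

-- if the toc scan starting at i finds index j, then i ≤ j, j is in range, and sSpec i
-- continues as cStart just past j
theorem sSpec_of_toc (r : List String) : ∀ (i j : Nat), aTocScan i r = (j : Int) →
    i ≤ j ∧ j < i + r.length ∧ sSpec i r = cStart (j + 1) (r.drop (j + 1 - i)) := by
  induction r with
  | nil => intro i j h; simp [aTocScan] at h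
  | cons l r ih =>
    intro i j h
    simp only [aTocScan] at h
    simp only [sSpec]
    by_cases hc : PySem.Str.isIn "Table of Contents" l = true
    · rw [if_pos hc] at h
      have hij : i = j := by exact_mod_cast h
      subst hij
      rw [if_pos hc]
      refine ⟨le_refl _, by simp only [List.length_cons]; omega, ?_⟩
      have h1 : i + 1 - i = 1 := by omega
      rw [h1, List.drop_one, List.tail_cons]
    · rw [if_neg hc] at h
      rw [if_neg hc]
      obtain ⟨h1, h2, h3⟩ := ih (i + 1) j h
      refine ⟨by omega, by simp only [List.length_cons]; omega, ?_⟩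
      rw [h3]
      have h4 : j + 1 - i = (j + 1 - (i + 1)) + 1 := by omega
      rw [h4, List.drop_succ_cons]

-- the toc scan returns -1 or a natural-number index
theorem aTocScan_cases (r : List String) : ∀ (i : Nat),
    aTocScan i r = -1 ∨ ∃ j : Nat, aTocScan i r = (j : Int) := by
  induction r with
  | nil => intro i; left; rfl
  | cons l r ih =>
    intro i
    simp only [aTocScan]
    split_ifs
    · right; exact ⟨i, rfl⟩
    · exact ih (i + 1)

-- ===== VERDICT (by name: the statement is the Claim_ definition above) =====
theorem clean_blog_content_spec : Claim_equal_clean_blog_content := by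
  intro content _
  unfold Spec_clean_blog_content
  simp only [clean_blog_content, clean_blog_content_alt]
  generalize (PySem.Str.split? content "\n").getD [] = lines
  rw [bLoop_title, bLoop_toc, bLoop_start]
  by_cases hg : 0 ≤ aTitleScan 0 lines ∧ aTitleScan 0 lines < aTocScan 0 lines
  · rw [if_pos hg]
    rcases aTocScan_cases lines 0 with hnone | ⟨j, hj⟩
    · omega
    obtain ⟨-, hjlt, hs⟩ := sSpec_of_toc lines 0 j hj
    have hstart : sSpec 0 lines =
        aStartScan lines (PySem.List.pyRange (aTocScan 0 lines + 1) (lines.length : Int) 1) := by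
      rw [hs, hj]
      have hcast : ((j : Int) + 1) = ((j + 1 : Nat) : Int) := by push_cast; ring
      rw [hcast, aStartScan_range lines (lines.length - (j + 1)) (j + 1) (by omega)]
      simp
    by_cases hp : 0 < aStartScan lines (PySem.List.pyRange (aTocScan 0 lines + 1) (lines.length : Int) 1)
    · rw [if_pos hp, if_pos ⟨hg.1, hg.2, by rw [hstart]; exact hp⟩, hstart]
    · rw [if_neg hp, if_neg (by rintro ⟨-, -, h⟩; rw [hstart] at h; exact hp h)]
  · rw [if_neg hg, if_neg (by rintro ⟨h1, h2, -⟩; exact hg ⟨h1, h2⟩)]
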